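-- pv_equiv track=rewrite | github.com/PythonHugs/AdventOfCode2023 | puzzle_3/part_2_puzzle_3.py | check_indices_on_other_line
-- ===== SOURCE A (Python) =====
-- def check_indices_on_other_line(indices, line):
--     target_indices = []
--     for i, index in enumerate(indices):
--         # if the number is not at the start of the line, check 1 to the left
--         if i == 0 and index != 0:
--             try:
--                 int(line[indices[0] - 1])
--                 target_index = indices[0] - 1
--                 # if a number is found keep checking left until you get the whole number
--                 while target_index >= 0:
--                     try:
--                         int(line[target_index])
--                         target_indices.insert(0, line[target_index])
--                         target_index -= 1
--                     except ValueError: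
--                         break
--             except ValueError:
--                 pass
--         # check the line at the spots directly above/below the numbers
--         target_indices.append(line[index])
--         # if the number is not at the end of the line, check 1 to the right
--         if i == len(indices) - 1 and index != len(line) - 1:
--             try:
--                 int(line[indices[-1] + 1])
--                 target_index = indices[-1] + 1
--                 while target_index <= len(line) - 1:
--                     try:
--                         int(line[target_index])
--                         target_indices.append(line[target_index])
--                         target_index += 1
--                     except ValueError:
--                         break
--             except ValueError:
--                 pass
--     return target_indices
-- ===== SOURCE B (Python) =====
-- def check_indices_on_other_line(indices, line):
--     # Builds a digit-run table for the whole line once, then reads the answer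
--     # off with slices, instead of expanding character by character.
--     if not indices:
--         return []
--     n = len(line)
--     digit = ['0' <= c <= '9' for c in line]
--     run_start = [0] * n
--     for p in range(n):
--         run_start[p] = run_start[p - 1] if p > 0 and digit[p] and digit[p - 1] else p
--     run_end = [0] * n
--     for p in range(n - 1, -1, -1):
--         run_end[p] = run_end[p + 1] if p + 1 < n and digit[p] and digit[p + 1] else p
--     first, last = indices[0], indices[-1]
--     left = list(line[run_start[first - 1]:first]) if first > 0 and digit[first - 1] else []
--     middle = [line[i] for i in indices]
--     right = list(line[last + 1:run_end[last + 1] + 1]) if 0 <= last + 1 < n and digit[last + 1] else []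
--     return left + middle + right
-- ===== Notes on version B (the rewrite author's own statement) =====
-- stated objective: alternative
-- what changed: Replaces A's enumerate loop with embedded left/right character-by-character expansion scans by precomputing a digit-run table (run_start/run_end) for the whole line in two passes and reading the left and right extensions off as slices.
-- intended difference: When the last index is <= -2 and the character at its wrapped right neighbour is a digit, A's right-expansion loop starts at a negative position and collects digits from the far end of the line via Python's negative-index wraparound (e.g. A([-1,-2],'a9') = ['9','a','9']), while B collects no right extension (['9','a']); B's value is intended since a position left of the line start has no right neighbour on the line. — e.g. on check_indices_on_other_line([-1, -2], "a9"): A returns ["9", "a", "9"], B returns ["9", "a"]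
import Mathlib
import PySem

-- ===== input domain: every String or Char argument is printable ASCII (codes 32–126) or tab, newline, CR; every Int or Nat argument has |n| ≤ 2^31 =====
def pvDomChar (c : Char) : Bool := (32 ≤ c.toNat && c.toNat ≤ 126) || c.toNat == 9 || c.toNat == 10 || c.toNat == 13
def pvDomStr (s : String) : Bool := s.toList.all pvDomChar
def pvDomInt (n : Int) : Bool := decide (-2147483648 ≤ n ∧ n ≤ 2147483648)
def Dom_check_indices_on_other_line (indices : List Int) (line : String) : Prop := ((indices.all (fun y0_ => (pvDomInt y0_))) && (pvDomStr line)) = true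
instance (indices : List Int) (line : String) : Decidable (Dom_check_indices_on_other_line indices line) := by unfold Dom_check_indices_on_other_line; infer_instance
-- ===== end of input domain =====

-- B replaces A's enumerate loop with embedded char-by-char expansion scans by a precomputed
-- digit-run table (run_start/run_end) over the whole line plus slicing; on last index ≤ -2 with a
-- digit at its wrapped neighbour A's wraparound scan and B's empty right part differ (D_ below).


-- shared helper: line[i] as a 1-char string; none = IndexError (the Python raises there,
-- outside Pre_; the port uses "" as a placeholder on that unreachable-in-Pre_ path)
def pvCharAt (lineC : List Char) (i : Int) : String :=
  (PySem.List.pyGet? lineC i).elim "" (fun c => String.ofList [c])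

-- ===== PORT A =====
-- `int(line[t])` on a single char of the ASCII domain succeeds exactly when the char is '0'..'9'
def pvIsDigitA (c : Char) : Bool := '0' ≤ c && c ≤ '9'

-- the inner `while target_index >= 0: try int(...) / insert(0, ...) / -= 1 except: break`;
-- the fuel counts the loop's remaining iterations: fuel = (t+1).toNat, positive ↔ the guard t ≥ 0
def pvLeftGoA (lineC : List Char) : Nat → Int → List String → List String
  | 0, _, acc => acc
  | f + 1, t, acc =>
    match PySem.List.pyGet? lineC t with
    | some c => if pvIsDigitA c then pvLeftGoA lineC f (t - 1) (String.ofList [c] :: acc) else acc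
    | none => acc          -- IndexError (unreachable: the loop stays in range)

def pvLeftLoopA (lineC : List Char) (t : Int) (acc : List String) : List String :=
  pvLeftGoA lineC (t + 1).toNat t acc

-- the inner `while target_index <= len(line) - 1: try int(...) / append / += 1 except: break`;
-- fuel = (len - t).toNat, positive ↔ the guard t ≤ len - 1
def pvRightGoA (lineC : List Char) : Nat → Int → List String → List String
  | 0, _, acc => acc
  | f + 1, t, acc =>
    match PySem.List.pyGet? lineC t with
    | some c => if pvIsDigitA c then pvRightGoA lineC f (t + 1) (acc ++ [String.ofList [c]]) else acc
    | none => acc          -- IndexError: Python would raise (outside Pre_); loop stops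

def pvRightLoopA (lineC : List Char) (t : Int) (acc : List String) : List String :=
  pvRightGoA lineC ((lineC.length : Int) - t).toNat t acc

-- the `for i, index in enumerate(indices)` loop, carrying target_indices as acc
def pvGoA (indices : List Int) (lineC : List Char) (i : Nat) (rest : List Int) (acc : List String) : List String :=
  match rest with
  | [] => acc
  | idx :: rest' =>
    -- `if i == 0 and index != 0`: indices[0] = idx here since i = 0
    let acc1 := if i = 0 ∧ idx ≠ 0 then
        match PySem.List.pyGet? lineC (idx - 1) with   -- try: int(line[indices[0] - 1])
        | some c => if pvIsDigitA c then pvLeftLoopA lineC (idx - 1) acc else acc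
        | none => acc      -- IndexError: Python raises uncaught (outside Pre_)
      else acc
    -- target_indices.append(line[index])
    let acc2 := acc1 ++ [pvCharAt lineC idx]
    -- `if i == len(indices) - 1 and index != len(line) - 1`: indices[-1] = idx here since i = len-1
    let acc3 := if i = indices.length - 1 ∧ idx ≠ (lineC.length : Int) - 1 then
        match PySem.List.pyGet? lineC (idx + 1) with   -- try: int(line[indices[-1] + 1])
        | some c => if pvIsDigitA c then pvRightLoopA lineC (idx + 1) acc2 else acc2
        | none => acc2     -- IndexError: Python raises uncaught (outside Pre_)
      else acc2
    pvGoA indices lineC (i + 1) rest' acc3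

def check_indices_on_other_line (indices : List Int) (line : String) : List String :=
  pvGoA indices line.toList 0 indices []

-- ===== PORT B =====
-- `'0' <= c <= '9'` of Source B
def pvDigitB (c : Char) : Bool := '0' ≤ c && c ≤ '9'

-- `run_start[p] = run_start[p-1] if p > 0 and digit[p] and digit[p-1] else p` over range(n)
def pvRunStart (digit : List Bool) (n : Nat) : List Int :=
  (List.range n).foldl (fun acc p =>
    acc ++ [if 0 < p ∧ digit.getD p false ∧ digit.getD (p-1) false then acc.getD (p-1) 0 else (p : Int)]) []

-- `run_end[p] = run_end[p+1] if p + 1 < n and digit[p] and digit[p+1] else p` for p = n-1 .. 0,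
-- built from position p = n - m upward: after m steps the list holds run_end[n-m .. n-1]
def pvRunEndGo (digit : List Bool) (n : Nat) : Nat → List Int
  | 0 => []
  | m + 1 =>
    let p := n - (m + 1)
    let rest := pvRunEndGo digit n m
    (if p + 1 < n ∧ digit.getD p false ∧ digit.getD (p+1) false then rest.headD (p : Int) else (p : Int)) :: rest

def pvRunEnd (digit : List Bool) (n : Nat) : List Int := pvRunEndGo digit n n

def check_indices_on_other_line_alt (indices : List Int) (line : String) : List String :=
  match indices with
  | [] => []
  | _ :: _ =>
    let lineC := line.toList
    let n := lineC.length
    let digit := lineC.map pvDigitB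
    let rs := pvRunStart digit n
    let re := pvRunEnd digit n
    let first := indices.headD 0
    let last := indices.getLastD 0
    let left :=
      if 0 < first ∧ (PySem.List.pyGet? digit (first - 1)).getD false then
        (PySem.List.slice lineC (some ((PySem.List.pyGet? rs (first - 1)).getD 0)) (some first)).map (fun c => String.ofList [c])
      else []
    let middle := indices.map (fun i => pvCharAt lineC i)
    let right :=
      if 0 ≤ last + 1 ∧ last + 1 < (n : Int) ∧ (PySem.List.pyGet? digit (last + 1)).getD false then
        (PySem.List.slice lineC (some (last + 1)) (some ((PySem.List.pyGet? re (last + 1)).getD 0 + 1))).map (fun c => String.ofList [c])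
      else []
    left ++ middle ++ right

-- ===== PRECONDITION & SPEC =====
-- Pre_ = exactly the inputs on which A returns (no IndexError): every index within Python's
-- valid (wraparound-included) range, and indices[0] ≠ -len(line) (there A's uncaught
-- `line[indices[0]-1]` lookup raises IndexError).
def Pre_check_indices_on_other_line (indices : List Int) (line : String) : Prop :=
  (∀ idx ∈ indices, -(line.toList.length : Int) ≤ idx ∧ idx < (line.toList.length : Int)) ∧
  indices.head? ≠ some (-(line.toList.length : Int))
instance (indices : List Int) (line : String) : Decidable (Pre_check_indices_on_other_line indices line) := by unfold Pre_check_indices_on_other_line; infer_instance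

def pvWitness_check_indices_on_other_line : List Int × String := ([1, 2], "a12b")

-- When the last index is ≤ -2 and the character at its wrapped right neighbour is a digit, A's
-- right-expansion loop starts at a negative position and collects digits from the far end of the
-- line via Python's negative-index wraparound, while B collects no right extension; B's value is
-- intended since a position left of the line start has no right neighbour on the line.
def D_check_indices_on_other_line (indices : List Int) (line : String) : Prop :=
  indices ≠ [] ∧
  indices.getLastD 0 ≤ -2 ∧
  -(line.toList.length : Int) ≤ indices.getLastD 0 ∧
  (let c := (PySem.List.pyGet? line.toList (indices.getLastD 0 + 1)).getD ' '
   '0' ≤ c ∧ c ≤ '9')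
instance (indices : List Int) (line : String) : Decidable (D_check_indices_on_other_line indices line) := by unfold D_check_indices_on_other_line; infer_instance

def Spec_check_indices_on_other_line (indices : List Int) (line : String) (out : List String) : Prop := ¬ D_check_indices_on_other_line indices line → out = check_indices_on_other_line_alt indices line
instance (indices : List Int) (line : String) (out : List String) : Decidable (Spec_check_indices_on_other_line indices line out) := by unfold Spec_check_indices_on_other_line; infer_instance

def pvDiffWitness_check_indices_on_other_line : List Int × String := ([-1, -2], "a9")
def pvDiffWitnessOut_check_indices_on_other_line : (List String) × (List String) := (["9", "a", "9"], ["9", "a"])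

-- ===== CLAIM (what is proved, stated in full; the proofs are below) =====
def Claim_unchanged_check_indices_on_other_line : Prop := ∀ (indices : List Int) (line : String), Dom_check_indices_on_other_line indices line → Pre_check_indices_on_other_line indices line → Spec_check_indices_on_other_line indices line (check_indices_on_other_line indices line)
def Claim_changed_check_indices_on_other_line : Prop := Dom_check_indices_on_other_line (pvDiffWitness_check_indices_on_other_line.1) (pvDiffWitness_check_indices_on_other_line.2) ∧ Pre_check_indices_on_other_line (pvDiffWitness_check_indices_on_other_line.1) (pvDiffWitness_check_indices_on_other_line.2) ∧ D_check_indices_on_other_line (pvDiffWitness_check_indices_on_other_line.1) (pvDiffWitness_check_indices_on_other_line.2) ∧ check_indices_on_other_line (pvDiffWitness_check_indices_on_other_line.1) (pvDiffWitness_check_indices_on_other_line.2) = pvDiffWitnessOut_check_indices_on_other_line.1 ∧ check_indices_on_other_line_alt (pvDiffWitness_check_indices_on_other_line.1) (pvDiffWitness_check_indices_on_other_line.2) = pvDiffWitnessOut_check_indices_on_other_line.2 ∧ pvDiffWitnessOut_check_indices_on_other_line.1 ≠ pvDiffWitnessOut_check_indices_on_other_line.2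
def Claim_exact_check_indices_on_other_line : Prop := ∀ (indices : List Int) (line : String), Dom_check_indices_on_other_line indices line → Pre_check_indices_on_other_line indices line → D_check_indices_on_other_line indices line → check_indices_on_other_line indices line ≠ check_indices_on_other_line_alt indices line

-- ===== LEMMAS AND PROOFS =====

-- proof-only helpers: the character-scan forms both sides are reduced to
def pvIsDigitB (c : Char) : Bool := '0' ≤ c && c ≤ '9'

def pvLeftB (lineC : List Char) (j : Int) : List String :=
  if _h : 0 ≤ j then
    match PySem.List.pyGet? lineC j with
    | some c => if pvIsDigitB c then String.ofList [c] :: pvLeftB lineC (j - 1) else []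
    | none => []
  else []
termination_by (j + 1).toNat
decreasing_by omega

def pvRightB (lineC : List Char) (j : Int) : List String :=
  if _h : j < (lineC.length : Int) then
    match PySem.List.pyGet? lineC j with
    | some c => if pvIsDigitB c then String.ofList [c] :: pvRightB lineC (j + 1) else []
    | none => []
  else []
termination_by ((lineC.length : Int) - j).toNat
decreasing_by omega

-- the scan-form decomposition of A (proved equal to A below)
def pvSpecOld (indices : List Int) (line : String) : List String :=
  match indices with
  | [] => []
  | h :: t =>
    let lineC := line.toList
    let left := if h ≠ 0 then (pvLeftB lineC (h - 1)).reverse else []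
    let lastI := (h :: t).getLast (List.cons_ne_nil h t)
    let middle := indices.map (fun i => pvCharAt lineC i)
    let right := if lastI ≠ (lineC.length : Int) - 1 then pvRightB lineC (lastI + 1) else []
    left ++ middle ++ right

theorem leftGo_eq (lineC : List Char) :
    ∀ (f : Nat) (t : Int) (acc : List String), f = (t + 1).toNat →
    pvLeftGoA lineC f t acc = (pvLeftB lineC t).reverse ++ acc := by
  intro f
  induction f with
  | zero =>
      intro t acc hf
      rw [pvLeftB, dif_neg (by omega : ¬ 0 ≤ t)]
      simp [pvLeftGoA]
  | succ f ih =>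
      intro t acc hf
      have ht : 0 ≤ t := by omega
      rw [pvLeftGoA]
      rcases hg : PySem.List.pyGet? lineC t with _ | c
      · rw [pvLeftB, dif_pos ht, hg]; simp
      · simp only []
        by_cases hd : pvIsDigitA c
        · rw [if_pos hd, ih (t - 1) _ (by omega)]
          conv_rhs => rw [pvLeftB, dif_pos ht, hg]
          simp [show pvIsDigitB c = true from hd]
        · rw [if_neg hd, pvLeftB, dif_pos ht, hg]
          simp [show ¬ pvIsDigitB c = true from hd]

theorem rightGo_eq (lineC : List Char) :
    ∀ (f : Nat) (t : Int) (acc : List String), f = ((lineC.length : Int) - t).toNat →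
    pvRightGoA lineC f t acc = acc ++ pvRightB lineC t := by
  intro f
  induction f with
  | zero =>
      intro t acc hf
      rw [pvRightB, dif_neg (by omega : ¬ t < (lineC.length : Int))]
      simp [pvRightGoA]
  | succ f ih =>
      intro t acc hf
      have ht : t < (lineC.length : Int) := by omega
      rw [pvRightGoA]
      rcases hg : PySem.List.pyGet? lineC t with _ | c
      · rw [pvRightB, dif_pos ht, hg]; simp
      · simp only []
        by_cases hd : pvIsDigitA c
        · rw [if_pos hd, ih (t + 1) _ (by omega)]
          conv_rhs => rw [pvRightB, dif_pos ht, hg]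
          simp [show pvIsDigitB c = true from hd]
        · rw [if_neg hd, pvRightB, dif_pos ht, hg]
          simp [show ¬ pvIsDigitB c = true from hd]

-- A's guarded `try int(line[j]) … while …` block = the left scan, reversed, before the accumulator
theorem preLeft_eq (lineC : List Char) (j : Int) (acc : List String) :
    (match PySem.List.pyGet? lineC j with
     | some c => if pvIsDigitA c then pvLeftLoopA lineC j acc else acc
     | none => acc) = (pvLeftB lineC j).reverse ++ acc := by
  rcases hg : PySem.List.pyGet? lineC j with _ | c
  · rw [pvLeftB]; split <;> simp_all
  · simp only []
    by_cases hd : pvIsDigitA c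
    · rw [if_pos hd, pvLeftLoopA, leftGo_eq lineC _ j acc rfl]
    · rw [if_neg hd, pvLeftB]
      split
      · rw [hg]; simp [show ¬ pvIsDigitB c = true from hd]
      · simp

-- A's guarded right block = the accumulator followed by the right scan
theorem preRight_eq (lineC : List Char) (j : Int) (acc : List String) :
    (match PySem.List.pyGet? lineC j with
     | some c => if pvIsDigitA c then pvRightLoopA lineC j acc else acc
     | none => acc) = acc ++ pvRightB lineC j := by
  rcases hg : PySem.List.pyGet? lineC j with _ | c
  · rw [pvRightB]; split <;> simp_all
  · simp only []
    by_cases hd : pvIsDigitA c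
    · rw [if_pos hd, pvRightLoopA, rightGo_eq lineC _ j acc rfl]
    · rw [if_neg hd, pvRightB]
      split
      · rw [hg]; simp [show ¬ pvIsDigitB c = true from hd]
      · simp

-- the tail of A's enumerate loop (i ≥ 1), on the true suffix of indices
theorem goA_tail (indices : List Int) (lineC : List Char) :
    ∀ (rest : List Int) (i : Nat) (acc : List String), 1 ≤ i → indices.drop i = rest →
    pvGoA indices lineC i rest acc =
      acc ++ rest.map (fun k => pvCharAt lineC k) ++
      (match rest.getLast? with
       | none => []
       | some lastI => if lastI ≠ (lineC.length : Int) - 1 then pvRightB lineC (lastI + 1) else []) := by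
  intro rest
  induction rest with
  | nil => intro i acc _ _; simp [pvGoA]
  | cons idx rest' ih =>
    intro i acc hi hdrop
    have hlen : indices.length - i = rest'.length + 1 := by
      have := congrArg List.length hdrop; simpa using this
    have hi_lt : i < indices.length := by omega
    rw [pvGoA]
    simp only [if_neg (by omega : ¬ (i = 0 ∧ idx ≠ 0))]
    cases rest' with
    | nil =>
      simp only [List.length_nil] at hlen
      have hlast : i = indices.length - 1 := by omega
      subst hlast
      rw [pvGoA]
      by_cases hb : idx ≠ (lineC.length : Int) - 1
      · rw [if_pos ⟨rfl, hb⟩, preRight_eq]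
        simp [hb]
      · rw [if_neg (by tauto : ¬ (indices.length - 1 = indices.length - 1 ∧ idx ≠ (lineC.length : Int) - 1))]
        simp only [ne_eq, not_not] at hb
        simp [hb]
    | cons y t =>
      simp only [List.length_cons] at hlen
      have hnot : ¬ (i = indices.length - 1 ∧ idx ≠ (lineC.length : Int) - 1) := by
        rintro ⟨h1, _⟩; omega
      simp only [if_neg hnot]
      have hdrop' : indices.drop (i + 1) = y :: t := by
        have : indices.drop (i + 1) = (indices.drop i).drop 1 := by
          rw [List.drop_drop]
        rw [this, hdrop]; rfl
      rw [ih (i + 1) _ (by omega) hdrop']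
      simp [List.getLast?_cons_cons]

theorem main_eq (indices : List Int) (line : String) :
    check_indices_on_other_line indices line = pvSpecOld indices line := by
  cases indices with
  | nil => rfl
  | cons h t =>
    unfold check_indices_on_other_line pvSpecOld
    rw [pvGoA]
    simp only []
    by_cases hh : h ≠ 0
    · simp only [if_pos (⟨trivial, hh⟩ : True ∧ h ≠ 0)]
      rw [preLeft_eq]
      cases t with
      | nil =>
        by_cases hb : h ≠ (line.toList.length : Int) - 1
        · rw [if_pos (⟨by simp, hb⟩ : 0 = (h :: ([] : List Int)).length - 1 ∧ h ≠ (line.toList.length : Int) - 1)]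
          rw [preRight_eq, pvGoA]
          simp [hh, List.getLast]
          exact fun hx => absurd hx (by simpa using hb)
        · rw [if_neg (by simpa using hb : ¬ (0 = (h :: ([] : List Int)).length - 1 ∧ h ≠ (line.toList.length : Int) - 1))]
          rw [pvGoA]
          simp only [ne_eq, not_not] at hb
          simp [hb, List.getLast]
          exact fun hx => absurd ((by simpa using hb : h = (line.length : Int) - 1).trans hx) hh
      | cons y t' =>
        have hnot : ¬ ((0 : Nat) = (h :: y :: t').length - 1 ∧ h ≠ (line.toList.length : Int) - 1) := by
          rintro ⟨h1, _⟩; simp at h1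
        rw [if_neg hnot]
        rw [goA_tail (h :: y :: t') line.toList (y :: t') 1 _ (by omega) rfl]
        rw [List.getLast?_eq_some_getLast (List.cons_ne_nil y t')]
        have hlast : ((h :: y :: t').getLast (List.cons_ne_nil h (y :: t'))) = ((y :: t').getLast (List.cons_ne_nil y t')) := by
          simp [List.getLast]
        simp [hh, hlast, List.append_assoc]
    · simp at hh
      subst hh
      simp only [if_neg (by simp : ¬ (True ∧ (0 : Int) ≠ 0))]
      cases t with
      | nil =>
        by_cases hb : (0 : Int) ≠ (line.toList.length : Int) - 1
        · rw [if_pos (⟨by simp, hb⟩ : 0 = ((0 : Int) :: ([] : List Int)).length - 1 ∧ (0 : Int) ≠ (line.toList.length : Int) - 1)]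
          rw [preRight_eq, pvGoA]
          simp [List.getLast]
          exact fun hx => absurd hx (by simpa using hb)
        · rw [if_neg (by simpa using hb : ¬ (0 = ((0 : Int) :: ([] : List Int)).length - 1 ∧ (0 : Int) ≠ (line.toList.length : Int) - 1))]
          rw [pvGoA]
          simp only [ne_eq, not_not] at hb
          simp [hb, List.getLast]
      | cons y t' =>
        have hnot : ¬ ((0 : Nat) = ((0 : Int) :: y :: t').length - 1 ∧ (0 : Int) ≠ (line.toList.length : Int) - 1) := by
          rintro ⟨h1, _⟩; simp at h1
        rw [if_neg hnot]
        rw [goA_tail ((0 : Int) :: y :: t') line.toList (y :: t') 1 _ (by omega) rfl]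
        rw [List.getLast?_eq_some_getLast (List.cons_ne_nil y t')]
        have hlast : (((0 : Int) :: y :: t').getLast (List.cons_ne_nil _ (y :: t'))) = ((y :: t').getLast (List.cons_ne_nil y t')) := by
          simp [List.getLast]
        simp [hlast]


-- ===== run-table characterisation =====

def pvDigAt (lineC : List Char) (p : Nat) : Bool := pvIsDigitB (lineC.getD p ' ')

-- the value run_start[p] carries: the start of the maximal digit run ending at p
def pvRsF (lineC : List Char) : Nat → Nat
  | 0 => 0
  | p + 1 => if pvDigAt lineC (p + 1) && pvDigAt lineC p then pvRsF lineC p else p + 1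

-- the value run_end[p] carries: the end of the maximal digit run starting at p
def pvReF (lineC : List Char) (p : Nat) : Nat :=
  if _h : p + 1 < lineC.length then
    (if pvDigAt lineC p && pvDigAt lineC (p + 1) then pvReF lineC (p + 1) else p)
  else p
termination_by lineC.length - p
decreasing_by omega

theorem digAt_elem (lineC : List Char) (p : Nat) (hp : p < lineC.length) :
    pvDigAt lineC p = pvIsDigitB lineC[p] := by
  simp [pvDigAt, List.getD_eq_getElem?_getD, List.getElem?_eq_getElem hp]

theorem digit_getD (lineC : List Char) (p : Nat) :
    (lineC.map pvDigitB).getD p false = pvDigAt lineC p := by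
  rcases Nat.lt_or_ge p lineC.length with h | h
  · rw [digAt_elem lineC p h]
    simp [List.getD_eq_getElem?_getD, List.getElem?_map, List.getElem?_eq_getElem h]
    rfl
  · rw [List.getD_eq_getElem?_getD, List.getElem?_map,
      List.getElem?_eq_none (by simpa using h), pvDigAt,
      List.getD_eq_getElem?_getD, List.getElem?_eq_none (by simpa using h)]
    decide

theorem leftB_neg (lineC : List Char) (j : Int) (hj : j < 0) : pvLeftB lineC j = [] := by
  rw [pvLeftB, dif_neg (by omega)]

theorem leftB_pos (lineC : List Char) (p : Nat) (hp : p < lineC.length) :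
    pvLeftB lineC (p : Int) =
      if pvDigAt lineC p then String.ofList [lineC[p]] :: pvLeftB lineC ((p : Int) - 1) else [] := by
  rw [pvLeftB, dif_pos (by omega)]
  simp only [PySem.List.pyGet?_natCast, List.getElem?_eq_getElem hp]
  rw [digAt_elem lineC p hp]

theorem rightB_ge (lineC : List Char) (j : Int) (hj : (lineC.length : Int) ≤ j) : pvRightB lineC j = [] := by
  rw [pvRightB, dif_neg (by omega)]

theorem rightB_pos (lineC : List Char) (p : Nat) (hp : p < lineC.length) :
    pvRightB lineC (p : Int) =
      if pvDigAt lineC p then String.ofList [lineC[p]] :: pvRightB lineC ((p : Int) + 1) else [] := by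
  rw [pvRightB, dif_pos (by exact_mod_cast hp)]
  simp only [PySem.List.pyGet?_natCast, List.getElem?_eq_getElem hp]
  rw [digAt_elem lineC p hp]

theorem rsF_le (lineC : List Char) (p : Nat) : pvRsF lineC p ≤ p := by
  induction p with
  | zero => simp [pvRsF]
  | succ q ih => rw [pvRsF]; split <;> omega

theorem reF_ge (lineC : List Char) (p : Nat) : p ≤ pvReF lineC p := by
  fun_induction pvReF lineC p with
  | case1 p h hd ih => omega
  | case2 p h hd => omega
  | case3 p h => omega

theorem reF_lt (lineC : List Char) (p : Nat) (hp : p < lineC.length) :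
    pvReF lineC p < lineC.length := by
  fun_induction pvReF lineC p with
  | case1 p h hd ih => exact ih (by omega)
  | case2 p h hd => omega
  | case3 p h => omega

theorem runStart_succ (digit : List Bool) (n : Nat) :
    pvRunStart digit (n + 1) = pvRunStart digit n ++
      [if 0 < n ∧ digit.getD n false ∧ digit.getD (n - 1) false then (pvRunStart digit n).getD (n - 1) 0 else (n : Int)] := by
  unfold pvRunStart
  rw [List.range_succ, List.foldl_append]
  rfl

theorem runStart_length (digit : List Bool) (n : Nat) : (pvRunStart digit n).length = n := by
  induction n with
  | zero => rfl
  | succ m ih => rw [runStart_succ]; simp [ih]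

theorem runStart_getD (lineC : List Char) (n : Nat) :
    ∀ p, p < n → (pvRunStart (lineC.map pvDigitB) n).getD p 0 = (pvRsF lineC p : Int) := by
  induction n with
  | zero => omega
  | succ m ih =>
    intro p hp
    rw [runStart_succ]
    rcases Nat.lt_or_ge p m with hpm | hpm
    · rw [List.getD_append _ _ _ _ (by rw [runStart_length]; omega)]
      exact ih p hpm
    · have hpe : p = m := by omega
      subst hpe
      have hlen : (pvRunStart (lineC.map pvDigitB) p).length = p := runStart_length _ _
      rw [List.getD_eq_getElem?_getD, List.getElem?_append_right (by omega), hlen]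
      simp only [Nat.sub_self, List.getElem?_cons_zero, Option.getD_some]
      rcases Nat.eq_zero_or_pos p with h0 | h0
      · subst h0; simp [pvRsF]
      · obtain ⟨q, rfl⟩ : ∃ q, p = q + 1 := ⟨p - 1, by omega⟩
        rw [digit_getD, Nat.add_sub_cancel, digit_getD]
        by_cases hd : pvDigAt lineC (q + 1) && pvDigAt lineC q
        · rw [if_pos ⟨h0, by simpa using Bool.and_elim_left hd, by simpa using Bool.and_elim_right hd⟩]
          rw [ih q (by omega)]
          rw [pvRsF, if_pos hd]
        · rw [if_neg (by rintro ⟨-, h1, h2⟩; simp [h1, h2] at hd)]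
          rw [pvRsF, if_neg (by simpa using hd)]

theorem runEndGo_eq (lineC : List Char) :
    ∀ m : Nat, m ≤ lineC.length →
    pvRunEndGo (lineC.map pvDigitB) lineC.length m =
      (List.range' (lineC.length - m) m).map (fun i => (pvReF lineC i : Int)) := by
  intro m
  induction m with
  | zero => intro _; rfl
  | succ k ih =>
    intro hm
    rw [pvRunEndGo]
    have hrange : List.range' (lineC.length - (k + 1)) (k + 1) =
        (lineC.length - (k + 1)) :: List.range' (lineC.length - k) k := by
      rw [List.range'_succ, show lineC.length - (k + 1) + 1 = lineC.length - k by omega]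
    rw [ih (by omega), hrange]
    simp only [List.map_cons]
    congr 1
    simp only [digit_getD]
    set p := lineC.length - (k + 1) with hp
    by_cases hcond : p + 1 < lineC.length ∧ pvDigAt lineC p = true ∧ pvDigAt lineC (p + 1) = true
    · rw [if_pos hcond]
      have hk : 0 < k := by
        have h1 := hcond.1
        rw [hp] at h1
        omega
      have hhead : lineC.length - k = p + 1 := by rw [hp]; omega
      rcases k with _ | k'
      · omega
      · rw [List.range'_succ]
        simp only [List.map_cons, List.headD_cons, hhead]
        conv_rhs => rw [pvReF]
        rw [dif_pos hcond.1, if_pos (by simp [hcond.2.1, hcond.2.2])]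
    · rw [if_neg hcond]
      conv_rhs => rw [pvReF]
      rcases Nat.lt_or_ge (p + 1) lineC.length with hlt | hge
      · rw [dif_pos hlt, if_neg (by
          intro hb
          exact hcond ⟨hlt, by simpa using Bool.and_elim_left hb, by simpa using Bool.and_elim_right hb⟩)]
      · rw [dif_neg (by omega)]

theorem runEnd_getD (lineC : List Char) (q : Nat) (hq : q < lineC.length) :
    (pvRunEnd (lineC.map pvDigitB) lineC.length).getD q 0 = (pvReF lineC q : Int) := by
  rw [pvRunEnd, runEndGo_eq lineC lineC.length (le_refl _)]
  simp [List.getD_eq_getElem?_getD, hq]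

theorem take_drop_singleton (lineC : List Char) (p : Nat) (hp : p < lineC.length) :
    (lineC.take (p + 1)).drop p = [lineC[p]] := by
  rw [List.drop_take, show p + 1 - p = 1 by omega, List.drop_eq_getElem_cons hp]
  rfl

theorem leftB_eq (lineC : List Char) (p : Nat) (hp : p < lineC.length)
    (hd : pvDigAt lineC p = true) :
    (pvLeftB lineC (p : Int)).reverse =
      ((lineC.take (p + 1)).drop (pvRsF lineC p)).map (fun c => String.ofList [c]) := by
  induction p with
  | zero =>
    rw [leftB_pos lineC 0 hp, if_pos hd,
      show ((0 : Nat) : Int) - 1 = -1 by rfl, leftB_neg lineC (-1) (by omega)]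
    rw [pvRsF, take_drop_singleton lineC 0 hp]
    simp
  | succ q ih =>
    have hq : q < lineC.length := by omega
    rw [leftB_pos lineC (q + 1) hp, if_pos hd,
      show ((q + 1 : Nat) : Int) - 1 = (q : Int) by push_cast; ring]
    by_cases hdq : pvDigAt lineC q = true
    · rw [List.reverse_cons, ih hq hdq]
      rw [pvRsF, if_pos (by simp [hd, hdq])]
      conv_rhs => rw [List.take_succ, List.getElem?_eq_getElem hp]
      simp only [Option.toList_some]
      rw [List.drop_append_of_le_length (by
        rw [List.length_take]
        have h1 := rsF_le lineC q
        omega)]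
      simp
    · rw [pvRsF, if_neg (by simp [hdq])]
      rw [leftB_pos lineC q hq, if_neg (by simp [hdq]), take_drop_singleton lineC (q + 1) hp]
      simp

theorem rightB_eq (lineC : List Char) (p : Nat) (hp : p < lineC.length)
    (hd : pvDigAt lineC p = true) :
    pvRightB lineC (p : Int) =
      ((lineC.take (pvReF lineC p + 1)).drop p).map (fun c => String.ofList [c]) := by
  fun_induction pvReF lineC p with
  | case1 p h hcond ih =>
    have hdp1 : pvDigAt lineC (p + 1) = true := by simpa using Bool.and_elim_right hcond
    rw [rightB_pos lineC p (by omega), if_pos hd,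
      show ((p : Nat) : Int) + 1 = ((p + 1 : Nat) : Int) by push_cast; ring]
    rw [ih h hdp1]
    have hre : p + 1 ≤ pvReF lineC (p + 1) := reF_ge lineC (p + 1)
    have hlen : p < (lineC.take (pvReF lineC (p + 1) + 1)).length := by
      rw [List.length_take]
      have h2 := reF_lt lineC (p + 1) h
      omega
    rw [List.drop_eq_getElem_cons hlen]
    simp only [List.map_cons]
    congr 1
    rw [List.getElem_take]
  | case2 p h hcond =>
    have hdp1 : pvDigAt lineC (p + 1) = false := by
      rcases hb : pvDigAt lineC (p + 1) with _ | _
      · rfl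
      · simp [hd, hb] at hcond
    rw [rightB_pos lineC p (by omega), if_pos hd,
      show ((p : Nat) : Int) + 1 = ((p + 1 : Nat) : Int) by push_cast; ring,
      rightB_pos lineC (p + 1) h, if_neg (by simp [hdp1]),
      take_drop_singleton lineC p (by omega)]
    simp
  | case3 p h =>
    rw [rightB_pos lineC p hp, if_pos hd,
      rightB_ge lineC ((p : Int) + 1) (by omega),
      take_drop_singleton lineC p hp]
    simp

-- B's left slice = A's left scan (any first index h < len)
theorem digit_elem (lineC : List Char) (p : Nat) (hp : p < lineC.length) :
    pvDigitB (lineC[p]'hp) = pvDigAt lineC p := by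
  rw [digAt_elem lineC p hp]; rfl

theorem left_eq (lineC : List Char) (h : Int) (hlt : h < (lineC.length : Int)) :
    (if 0 < h ∧ ((PySem.List.pyGet? (lineC.map pvDigitB) (h - 1)).getD false = true) then
       (PySem.List.slice lineC (some ((PySem.List.pyGet? (pvRunStart (lineC.map pvDigitB) lineC.length) (h - 1)).getD 0)) (some h)).map (fun c => String.ofList [c])
     else []) = (if h ≠ 0 then (pvLeftB lineC (h - 1)).reverse else []) := by
  rcases lt_trichotomy h 0 with hneg | hzero | hpos
  · rw [if_neg (by rintro ⟨h1, -⟩; omega), if_pos (by omega),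
      leftB_neg lineC (h - 1) (by omega)]
    rfl
  · subst hzero
    rw [if_neg (by rintro ⟨h1, -⟩; omega), if_neg (by simp)]
  · obtain ⟨q, hq⟩ : ∃ q : Nat, h - 1 = (q : Int) := ⟨(h - 1).toNat, by omega⟩
    have hqlen : q < lineC.length := by omega
    rw [hq, PySem.List.pyGet?_natCast, List.getElem?_map,
      List.getElem?_eq_getElem hqlen]
    simp only [Option.map_some, Option.getD_some, digit_elem]
    by_cases hd : pvDigAt lineC q = true
    · rw [if_pos ⟨hpos, hd⟩, if_pos (by omega)]
      rw [PySem.List.pyGet?_natCast, ← List.getD_eq_getElem?_getD,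
        runStart_getD lineC lineC.length q hqlen]
      rw [show h = ((q + 1 : Nat) : Int) by omega, PySem.List.slice_natCast,
        leftB_eq lineC q hqlen hd, List.drop_take]
    · rw [if_neg (by rintro ⟨-, h2⟩; exact hd h2), if_pos (by omega),
        leftB_pos lineC q hqlen, if_neg hd]
      rfl

-- B's right slice = A's right scan, outside the wraparound region
theorem right_eq (lineC : List Char) (l : Int) (hge : -(lineC.length : Int) ≤ l)
    (hlt : l < (lineC.length : Int))
    (hnd : l ≤ -2 → pvIsDigitB ((PySem.List.pyGet? lineC (l + 1)).getD ' ') = false) :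
    (if 0 ≤ l + 1 ∧ l + 1 < (lineC.length : Int) ∧ ((PySem.List.pyGet? (lineC.map pvDigitB) (l + 1)).getD false = true) then
       (PySem.List.slice lineC (some (l + 1)) (some ((PySem.List.pyGet? (pvRunEnd (lineC.map pvDigitB) lineC.length) (l + 1)).getD 0 + 1))).map (fun c => String.ofList [c])
     else []) = (if l ≠ (lineC.length : Int) - 1 then pvRightB lineC (l + 1) else []) := by
  rcases lt_trichotomy l (-1) with hneg | hm1 | hpos
  · -- l ≤ -2: A wraps, but outside D_ the wrapped character is not a digit, so both are empty
    rw [if_neg (by rintro ⟨h1, -⟩; omega), if_pos (by omega)]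
    rw [pvRightB, dif_pos (by omega)]
    rcases hg : PySem.List.pyGet? lineC (l + 1) with _ | c
    · rfl
    · have hc := hnd (by omega)
      rw [hg] at hc
      simp only [Option.getD_some] at hc
      simp [hc]
  · -- l = -1: both scan from position 0
    subst hm1
    have hlen0 : 1 ≤ lineC.length := by omega
    rw [show ((-1 : Int) + 1) = ((0 : Nat) : Int) by omega,
      PySem.List.pyGet?_natCast, List.getElem?_map, List.getElem?_eq_getElem (by omega)]
    simp only [Option.map_some, Option.getD_some, digit_elem]
    by_cases hd : pvDigAt lineC 0 = true
    · rw [if_pos ⟨by omega, by exact_mod_cast hlen0, hd⟩, if_pos (by omega)]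
      rw [PySem.List.pyGet?_natCast, ← List.getD_eq_getElem?_getD,
        runEnd_getD lineC 0 (by omega)]
      rw [show (pvReF lineC 0 : Int) + 1 = ((pvReF lineC 0 + 1 : Nat) : Int) by push_cast; ring,
        PySem.List.slice_natCast, rightB_eq lineC 0 (by omega) hd, List.drop_take]
    · rw [if_neg (by rintro ⟨-, -, h3⟩; exact hd h3), if_pos (by omega),
        rightB_pos lineC 0 (by omega), if_neg hd]
  · -- 0 ≤ l < len
    have hl0 : 0 ≤ l := by omega
    by_cases hlast : l = (lineC.length : Int) - 1
    · rw [if_neg (by rintro ⟨-, h2, -⟩; omega), if_neg (by simpa using hlast)]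
    · have hlt1 : l + 1 < (lineC.length : Int) := by omega
      obtain ⟨q, hq⟩ : ∃ q : Nat, l + 1 = (q : Int) := ⟨(l + 1).toNat, by omega⟩
      have hqlen : q < lineC.length := by omega
      rw [hq, PySem.List.pyGet?_natCast, List.getElem?_map, List.getElem?_eq_getElem hqlen]
      simp only [Option.map_some, Option.getD_some, digit_elem]
      by_cases hd : pvDigAt lineC q = true
      · rw [if_pos ⟨by omega, by omega, hd⟩, if_pos hlast]
        rw [PySem.List.pyGet?_natCast, ← List.getD_eq_getElem?_getD,
          runEnd_getD lineC q hqlen]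
        rw [show (pvReF lineC q : Int) + 1 = ((pvReF lineC q + 1 : Nat) : Int) by push_cast; ring,
          PySem.List.slice_natCast, rightB_eq lineC q hqlen hd, List.drop_take]
      · rw [if_neg (by rintro ⟨-, -, h3⟩; exact hd h3), if_pos hlast,
          rightB_pos lineC q hqlen, if_neg hd]

theorem getLastD_eq (h : Int) (t : List Int) :
    (h :: t).getLastD 0 = (h :: t).getLast (List.cons_ne_nil h t) := by
  rw [List.getLastD_eq_getLast?, List.getLast?_eq_some_getLast (List.cons_ne_nil h t)]
  rfl

theorem alt_eq_specOld (indices : List Int) (line : String)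
    (hpre : Pre_check_indices_on_other_line indices line)
    (hnd : ¬ D_check_indices_on_other_line indices line) :
    check_indices_on_other_line_alt indices line = pvSpecOld indices line := by
  cases indices with
  | nil => rfl
  | cons h t =>
    have hmemh := hpre.1 h List.mem_cons_self
    have hlastmem : (h :: t).getLast (List.cons_ne_nil h t) ∈ h :: t := List.getLast_mem _
    have hlast := hpre.1 _ hlastmem
    unfold check_indices_on_other_line_alt pvSpecOld
    simp only []
    rw [show (h :: t).headD 0 = h from rfl, getLastD_eq h t]
    rw [left_eq line.toList h hmemh.2]
    rw [right_eq line.toList _ hlast.1 hlast.2 (by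
      intro hle
      by_contra hdig
      apply hnd
      refine ⟨List.cons_ne_nil h t, ?_, ?_, ?_⟩
      · rw [getLastD_eq h t]; exact hle
      · rw [getLastD_eq h t]; exact hlast.1
      · rw [getLastD_eq h t]
        simp only [pvIsDigitB] at hdig
        constructor
        · by_contra hc
          exact hdig (by simp [decide_eq_false (by exact hc)])
        · by_contra hc
          exact hdig (by simp [decide_eq_false (by exact hc)]))]

-- ===== VERDICT\n\n (by name: the statement is the Claim_ definition above) =====
theorem check_indices_on_other_line_spec : Claim_unchanged_check_indices_on_other_line := by
  intro indices line _ hpre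
  unfold Spec_check_indices_on_other_line
  intro hnd
  rw [main_eq indices line]
  exact (alt_eq_specOld indices line hpre hnd).symm
theorem check_indices_on_other_line_changed : Claim_changed_check_indices_on_other_line := by
  unfold Claim_changed_check_indices_on_other_line; decide
theorem check_indices_on_other_line_tight : Claim_exact_check_indices_on_other_line := by
  intro indices line _ hpre hD
  rw [main_eq indices line]
  cases indices with
  | nil => exact absurd rfl hD.1
  | cons h t =>
    obtain ⟨-, hle, hge, hdig⟩ := hD
    rw [getLastD_eq h t] at hle hge hdig
    have hmemh := hpre.1 h List.mem_cons_self
    set lastI := (h :: t).getLast (List.cons_ne_nil h t) with hlI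
    -- A's right part is a nonempty wraparound scan, B's is empty
    obtain ⟨c, hc⟩ : ∃ c, PySem.List.pyGet? line.toList (lastI + 1) = some c := by
      rcases hg : PySem.List.pyGet? line.toList (lastI + 1) with _ | c
      · exfalso
        rw [PySem.List.pyGet?_eq_none_iff] at hg
        exact hg (by unfold PySem.Raise.InRange; omega)
      · exact ⟨c, rfl⟩
    have hcdig : pvIsDigitB c = true := by
      rw [hc] at hdig
      simp only [Option.getD_some] at hdig
      simp [pvIsDigitB, hdig.1, hdig.2]
    have hRA : pvRightB line.toList (lastI + 1) =
        String.ofList [c] :: pvRightB line.toList (lastI + 1 + 1) := by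
      rw [pvRightB, dif_pos (by omega), hc]
      simp [hcdig]
    intro heq
    unfold pvSpecOld check_indices_on_other_line_alt at heq
    simp only [] at heq
    rw [show (h :: t).headD 0 = h from rfl, getLastD_eq h t, ← hlI,
      left_eq line.toList h hmemh.2] at heq
    rw [if_pos (by omega : lastI ≠ (line.toList.length : Int) - 1), hRA] at heq
    rw [if_neg (show ¬(0 ≤ lastI + 1 ∧ lastI + 1 < (line.toList.length : Int) ∧ ((PySem.List.pyGet? (line.toList.map pvDigitB) (lastI + 1)).getD false = true)) by rintro ⟨h1, -⟩; omega)] at heq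
    have hlen := congrArg List.length heq
    simp [List.length_append] at hlen
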